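-- pv_equiv track=rewrite | github.com/TexasThug/Python_works | python_exercises/basics/lists/list_new_training_exercices#4.py | square_at_odd_index
-- ===== SOURCE A (Python) =====
-- def square_at_odd_index(numbers):
--     """
--     Retourne une liste contenant le carré des éléments
--     situés aux index impairs (1, 3, 5, ...).
--     Exemple : [2,3,4,5] → [9,25]
--     """
--     index = 0
--     lst_square = []
--
--     for n in numbers :
--         if index % 2 != 0:
--             lst_square.append(n*n)
--         index += 1
--
--     return lst_square
-- ===== SOURCE B (Python) =====
-- def square_at_odd_index(numbers):
--     """Walk straight along the odd indices 1, 3, 5, ... squaring each,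
--     instead of scanning every element with a parity test."""
--     result = []
--     i = 1
--     while i < len(numbers):
--         result.append(numbers[i] * numbers[i])
--         i += 2
--     return result
-- ===== Notes on version B (the rewrite author's own statement) =====
-- stated objective: alternative
-- what changed: Replaces A's scan over every element with a running index counter and an index%2 branch by a stride walk that visits only the odd indices 1,3,5,... directly, so there is no parity test and no counter over even elements.
import Mathlib
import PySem

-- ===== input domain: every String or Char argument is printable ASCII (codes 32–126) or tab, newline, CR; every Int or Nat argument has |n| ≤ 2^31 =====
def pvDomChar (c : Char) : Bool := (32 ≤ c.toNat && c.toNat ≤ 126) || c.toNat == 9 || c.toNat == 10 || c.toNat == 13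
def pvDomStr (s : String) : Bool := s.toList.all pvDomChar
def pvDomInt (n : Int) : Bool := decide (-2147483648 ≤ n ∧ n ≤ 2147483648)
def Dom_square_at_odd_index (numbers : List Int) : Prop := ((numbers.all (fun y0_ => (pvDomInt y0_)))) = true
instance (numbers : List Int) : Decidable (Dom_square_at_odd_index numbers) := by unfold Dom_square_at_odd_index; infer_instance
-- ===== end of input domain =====

-- B replaces A's every-element scan with a parity test by a direct stride walk over indices 1,3,5,... (alternative decomposition, same cost).

-- ===== PORT A =====
-- A: index = 0; lst_square = []; for n in numbers: if index % 2 != 0: append(n*n); index += 1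
def square_at_odd_index (numbers : List Int) : List Int :=
  (numbers.foldl
    (fun (st : Int × List Int) n =>
      (st.1 + 1, if PySem.Int.mod st.1 2 ≠ 0 then st.2 ++ [n * n] else st.2))
    (0, [])).2

-- ===== PORT B =====
-- B's while loop: i = 1; while i < len(numbers): result.append(numbers[i]*numbers[i]); i += 2
-- numbers[i] is in range exactly when the loop guard holds, hence the dite.
def square_at_odd_index_altLoop (numbers : List Int) (i : Nat) : List Int :=
  if h : i < numbers.length then
    numbers[i] * numbers[i] :: square_at_odd_index_altLoop numbers (i + 2)
  else []
termination_by numbers.length - i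

def square_at_odd_index_alt (numbers : List Int) : List Int :=
  square_at_odd_index_altLoop numbers 1

-- ===== PRECONDITION & SPEC =====
def Spec_square_at_odd_index (numbers : List Int) (out : List Int) : Prop := out = square_at_odd_index_alt numbers
instance (numbers : List Int) (out : List Int) : Decidable (Spec_square_at_odd_index numbers out) := by unfold Spec_square_at_odd_index; infer_instance

-- ===== CLAIM (what is proved, stated in full; the proofs are below) =====
def Claim_equal_square_at_odd_index : Prop := ∀ (numbers : List Int), Dom_square_at_odd_index numbers → Spec_square_at_odd_index numbers (square_at_odd_index numbers)

-- ===== LEMMAS AND PROOFS =====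

-- Proof-side middle form: square the second element of each consecutive pair.
def pairSq : List Int → List Int
  | [] => []
  | [_] => []
  | _ :: b :: rest => b * b :: pairSq rest

theorem pairSq_of_short (l : List Int) (h : l.length ≤ 1) : pairSq l = [] := by
  match l with
  | [] => rfl
  | [_] => rfl
  | _ :: _ :: _ => simp at h

-- A's loop invariant: started at an even index with accumulator acc,
-- the fold appends exactly the pairwise squares.
theorem square_loop_eq (xs : List Int) :
    ∀ (i : Int) (acc : List Int), i % 2 = 0 →
    (xs.foldl
      (fun (st : Int × List Int) n =>
        (st.1 + 1, if PySem.Int.mod st.1 2 ≠ 0 then st.2 ++ [n * n] else st.2))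
      (i, acc)).2 = acc ++ pairSq xs := by
  induction xs using pairSq.induct with
  | case1 => intro i acc _; simp [pairSq]
  | case2 a =>
    intro i acc h
    simp [pairSq, List.foldl, h]
  | case3 a b rest ih =>
    intro i acc h
    have h1 : PySem.Int.mod i 2 = 0 := by
      rw [PySem.Int.mod_eq_emod_of_pos (by omega)]; exact h
    have h2 : PySem.Int.mod (i + 1) 2 ≠ 0 := by
      rw [PySem.Int.mod_eq_emod_of_pos (by omega)]; omega
    have h3 : (i + 1 + 1) % 2 = 0 := by omega
    simp only [List.foldl, h1, h2, if_pos, if_neg, ne_eq, not_true_eq_false,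
      not_false_eq_true]
    rw [ih (i + 1 + 1) (acc ++ [b * b]) h3]
    simp [pairSq]

-- B's loop computes the pairwise squares of the suffix starting one before i.
theorem altLoop_eq_pairSq (xs : List Int) :
    ∀ (i : Nat), 1 ≤ i → square_at_odd_index_altLoop xs i = pairSq (xs.drop (i - 1)) := by
  intro i
  induction i using square_at_odd_index_altLoop.induct xs with
  | case1 i h ih =>
    intro h1
    rw [square_at_odd_index_altLoop, dif_pos h]
    have hlt : i - 1 < xs.length := by omega
    rw [List.drop_eq_getElem_cons hlt]
    have hi : i - 1 + 1 = i := by omega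
    rw [hi, List.drop_eq_getElem_cons h]
    rw [pairSq, ih (by omega)]
    have : i + 2 - 1 = i + 1 := by omega
    rw [this]
  | case2 i h =>
    intro _
    rw [square_at_odd_index_altLoop, dif_neg h]
    rw [pairSq_of_short]
    simp; omega

-- ===== VERDICT (by name: the statement is the Claim_ definition above) =====
theorem square_at_odd_index_spec : Claim_equal_square_at_odd_index := by
  intro numbers _
  unfold Spec_square_at_odd_index square_at_odd_index square_at_odd_index_alt
  rw [altLoop_eq_pairSq numbers 1 (by omega)]
  simpa using square_loop_eq numbers 0 [] (by decide)
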